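-- pv_equiv track=rewrite | github.com/RojasMN/penguin-projections | preprocessing/processing_tools.py | extract_valid_chunks
-- ===== SOURCE A (Python) =====
-- def extract_valid_chunks(years, min_span = 10, max_gap = 2):
--
--     """
--     Identifies continuous segments of years that meet the following criteria:
--
--     1. The time span between the first and last year in the segment is at least 'min_span' years.
--     2. Gaps between consecutive years within the segment do not exceed 'max_gap' years.
--
--     Returns: A list of tuples, where each tuple represents a valid segment as (start_year, end_year).
--
--     """
--
--     if not years:
--         return []
--
--     years = sorted(set(years))
--     chunks = []
--     current_chunk = [years[0]]
--
--     for y in years[1:]: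
--         if y - current_chunk[-1] <= max_gap:
--             current_chunk.append(y)
--         else:
--             # Saves the segment if its valid, and continues with the next one
--             if current_chunk[-1] - current_chunk[0] >= min_span:
--                 chunks.append((current_chunk[0], current_chunk[-1]))
--             current_chunk = [y]
--
--     # Checks last segment
--     if current_chunk[-1] - current_chunk[0] >= min_span:
--         chunks.append((current_chunk[0], current_chunk[-1]))
--
--     return chunks
-- ===== SOURCE B (Python) =====
-- def extract_valid_chunks(years, min_span = 10, max_gap = 2):
--     def chunks(ys):
--         if not ys:
--             return []
--         i = 1
--         while i < len(ys) and ys[i] - ys[i-1] <= max_gap: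
--             i += 1
--         head = [(ys[0], ys[i-1])] if ys[i-1] - ys[0] >= min_span else []
--         return head + chunks(ys[i:])
--     return chunks(sorted(set(years)))
-- ===== Notes on version B (the rewrite author's own statement) =====
-- stated objective: alternative
-- what changed: A sweeps once with a mutable current_chunk accumulator and flushes segments as it goes; B is a recursive divide-and-emit: it scans the longest gap-bounded prefix run, emits it if wide enough, and recurses on the remaining suffix, with no accumulated loop state.
import Mathlib
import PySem

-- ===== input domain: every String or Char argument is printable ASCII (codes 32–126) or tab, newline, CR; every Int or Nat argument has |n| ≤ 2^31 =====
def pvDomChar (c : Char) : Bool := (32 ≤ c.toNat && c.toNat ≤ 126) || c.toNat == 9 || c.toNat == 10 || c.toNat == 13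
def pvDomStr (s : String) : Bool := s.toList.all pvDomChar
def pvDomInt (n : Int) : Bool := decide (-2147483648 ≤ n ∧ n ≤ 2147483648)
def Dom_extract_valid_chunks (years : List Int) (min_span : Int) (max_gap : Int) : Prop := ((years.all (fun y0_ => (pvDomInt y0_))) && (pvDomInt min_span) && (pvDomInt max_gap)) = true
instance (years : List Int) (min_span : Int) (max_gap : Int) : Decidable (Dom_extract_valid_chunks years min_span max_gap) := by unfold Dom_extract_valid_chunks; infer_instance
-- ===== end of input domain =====

-- B replaces A's single accumulator sweep by a recursive split-at-first-gap: take the longest gap-bounded prefix run, emit it if wide enough, recurse on the suffix (objective: alternative).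


-- ===== PORT A =====
-- loop body of A: state = (chunks, current_chunk); current_chunk is always nonempty,
-- so current_chunk[-1] / current_chunk[0] are ported as getLastD 0 / headD 0
def pvStepA (min_span max_gap : Int) (st : List (Int × Int) × List Int) (y : Int) :
    List (Int × Int) × List Int :=
  if y - st.2.getLastD 0 ≤ max_gap then (st.1, st.2 ++ [y])
  else if st.2.getLastD 0 - st.2.headD 0 ≥ min_span then
    (st.1 ++ [(st.2.headD 0, st.2.getLastD 0)], [y])
  else (st.1, [y])

def extract_valid_chunks (years : List Int) (min_span : Int) (max_gap : Int) : List (Int × Int) :=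
  if years = [] then []
  else
    match PySem.List.sorted (PySem.Set.ofList years) (fun x => x) false with
    | [] => []  -- unreachable: sorted(set(years)) of a nonempty list is nonempty
    | y0 :: rest =>
      let st := rest.foldl (pvStepA min_span max_gap) ([], [y0])
      if st.2.getLastD 0 - st.2.headD 0 ≥ min_span then
        st.1 ++ [(st.2.headD 0, st.2.getLastD 0)]
      else st.1

-- ===== PORT B =====
-- B's inner while loop: starting from prev, consume the gap-bounded prefix run;
-- returns (last year of the run, remaining suffix)
def pvRun (max_gap : Int) (prev : Int) : List Int → Int × List Int
  | [] => (prev, [])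
  | y :: t => if y - prev ≤ max_gap then pvRun max_gap y t else (prev, y :: t)

theorem pvRun_len (max_gap prev : Int) : ∀ t : List Int, (pvRun max_gap prev t).2.length ≤ t.length := by
  intro t
  induction t generalizing prev with
  | nil => simp [pvRun]
  | cons y t ih =>
    simp only [pvRun]
    split
    · exact Nat.le_trans (ih y) (Nat.le_succ _)
    · simp

-- B's recursive chunks helper
def pvChunks (min_span max_gap : Int) : List Int → List (Int × Int)
  | [] => []
  | y :: t =>
    let r := pvRun max_gap y t
    (if r.1 - y ≥ min_span then [(y, r.1)] else []) ++ pvChunks min_span max_gap r.2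
termination_by ys => ys.length
decreasing_by
  exact Nat.lt_succ_of_le (pvRun_len max_gap y t)

def extract_valid_chunks_alt (years : List Int) (min_span : Int) (max_gap : Int) : List (Int × Int) :=
  pvChunks min_span max_gap (PySem.List.sorted (PySem.Set.ofList years) (fun x => x) false)

-- ===== PRECONDITION & SPEC =====
def Spec_extract_valid_chunks (years : List Int) (min_span : Int) (max_gap : Int) (out : List (Int × Int)) : Prop := out = extract_valid_chunks_alt years min_span max_gap
instance (years : List Int) (min_span : Int) (max_gap : Int) (out : List (Int × Int)) : Decidable (Spec_extract_valid_chunks years min_span max_gap out) := by unfold Spec_extract_valid_chunks; infer_instance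

-- ===== CLAIM =====
def Claim_equal_extract_valid_chunks : Prop := ∀ (years : List Int) (min_span : Int) (max_gap : Int), Dom_extract_valid_chunks years min_span max_gap → Spec_extract_valid_chunks years min_span max_gap (extract_valid_chunks years min_span max_gap)

-- ===== LEMMAS AND PROOFS =====

-- main invariant: A's finished fold over t from state (chunks, cur) — cur nonempty with
-- head s and last p — equals chunks ++ the run (s, last of run through t) if wide enough
-- ++ B's recursive chunks of the rest.
theorem pv_loop_eq (min_span max_gap : Int) (t : List Int) :
    ∀ (chunks : List (Int × Int)) (cur : List Int) (s p : Int),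
      cur ≠ [] → cur.headD 0 = s → cur.getLastD 0 = p →
      (let st := t.foldl (pvStepA min_span max_gap) (chunks, cur);
        if st.2.getLastD 0 - st.2.headD 0 ≥ min_span then
          st.1 ++ [(st.2.headD 0, st.2.getLastD 0)]
        else st.1)
      = chunks ++ (if (pvRun max_gap p t).1 - s ≥ min_span then [(s, (pvRun max_gap p t).1)] else [])
          ++ pvChunks min_span max_gap (pvRun max_gap p t).2 := by
  induction t with
  | nil =>
    intro chunks cur s p hne hh hl
    simp only [List.foldl_nil, pvRun, pvChunks, hh, hl]
    by_cases h : p - s ≥ min_span <;> simp [h]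
  | cons y t ih =>
    intro chunks cur s p hne hh hl
    simp only [List.foldl_cons]
    by_cases hgap : y - p ≤ max_gap
    · have hA : pvStepA min_span max_gap (chunks, cur) y = (chunks, cur ++ [y]) := by
        simp only [pvStepA]; rw [hl, if_pos hgap]
      rw [hA]
      have := ih chunks (cur ++ [y]) s y (by simp) (by
        cases cur with
        | nil => exact absurd rfl hne
        | cons a l => simpa using hh) (by simp)
      rw [this]
      simp only [pvRun, if_pos hgap]
    · have hA : pvStepA min_span max_gap (chunks, cur) y =
          (if p - s ≥ min_span then chunks ++ [(s, p)] else chunks, [y]) := by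
        simp only [pvStepA]; rw [hl, hh, if_neg hgap]
        by_cases hsp : p - s ≥ min_span <;> simp [hsp]
      rw [hA]
      have := ih (if p - s ≥ min_span then chunks ++ [(s, p)] else chunks) [y] y y
        (by simp) (by simp) (by simp)
      rw [this]
      simp only [pvRun, if_neg hgap]
      rw [pvChunks]
      by_cases hsp : p - s ≥ min_span <;> simp [hsp]

-- ===== VERDICT =====
theorem extract_valid_chunks_spec : Claim_equal_extract_valid_chunks := by
  intro years min_span max_gap _
  unfold Spec_extract_valid_chunks extract_valid_chunks extract_valid_chunks_alt
  by_cases hy : years = []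
  · simp [hy, PySem.Set.ofList, PySem.List.sorted, pvChunks]
  · simp only [if_neg hy]
    cases h : PySem.List.sorted (PySem.Set.ofList years) (fun x => x) false with
    | nil => rw [pvChunks]
    | cons y0 rest =>
      rw [pvChunks]
      exact pv_loop_eq min_span max_gap rest [] [y0] y0 y0 (by simp) (by simp) (by simp)
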